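-- pv_equiv track=rewrite | github.com/pypi-data/pypi-mirror-404 | packages/ndscope/ndscope-0.20.6.tar.gz/ndscope-0.20.6/ndscope/channel_select.py | case_insensitive_pattern
-- ===== SOURCE A (Python) =====
-- def char_to_case_insensitive(char: str) -> str:
--     """return a single char in a case insensitive format
--
--     does nothing to chars that aren't cased alphabetical
--     """
--     if char.isupper() or char.islower():
--         return f"[{char.lower()}{char.upper()}]"
--     return char
--
-- def case_insensitive_pattern(pattern: str) -> str:
--     """
--     Return a glob pattern suitable for fnmatch that's case insensitive
--     """
--
--     # states 0 = read, 1 = escape, 2 = in brackets, 3 = escape-in-brackets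
--     state = 0
--     new_pattern = ""
--     for c in pattern:
--         if state == 0:
--             # read
--             if c == "\\":
--                 state = 1
--                 new_pattern += c
--             elif c == "[":
--                 state = 2
--                 new_pattern += c
--             else:
--                 new_pattern += char_to_case_insensitive(c)
--         elif state == 1:
--             new_pattern += c
--             state = 0
--         elif state == 3:
--             new_pattern += c
--             state = 2
--         elif state == 2:
--             if c == "]":
--                 state = 0
--             elif c == "\\":
--                 state = 3
--             else:
--                 state = 2
--             new_pattern += c
--         else:
--             raise Exception(f"Unknown case-insensitive state {state}")
--     return new_pattern
-- ===== SOURCE B (Python) =====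
-- def char_to_case_insensitive(char: str) -> str:
--     if char.isupper() or char.islower():
--         return f"[{char.lower()}{char.upper()}]"
--     return char
--
--
-- def case_insensitive_pattern(pattern: str) -> str:
--     # Index-based scan processing escapes and bracket groups as whole units.
--     out = []
--     i = 0
--     n = len(pattern)
--     while i < n:
--         c = pattern[i]
--         if c == "\\":
--             out.append(pattern[i:i + 2])
--             i += 2
--         elif c == "[":
--             # find the matching unescaped ']'
--             j = i + 1
--             while j < n and pattern[j] != "]":
--                 j += 2 if pattern[j] == "\\" else 1
--             if j < n:
--                 out.append(pattern[i:j + 1])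
--                 i = j + 1
--             else:
--                 out.append(pattern[i:])
--                 break
--         else:
--             out.append(char_to_case_insensitive(c))
--             i += 1
--     return "".join(out)
-- ===== Notes on version B (the rewrite author's own statement) =====
-- stated objective: alternative
-- what changed: Replaces A's four-state per-character state machine with a unit-based scan that emits escape pairs whole and copies each bracket group verbatim via a dedicated group-scanning helper.
import Mathlib
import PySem

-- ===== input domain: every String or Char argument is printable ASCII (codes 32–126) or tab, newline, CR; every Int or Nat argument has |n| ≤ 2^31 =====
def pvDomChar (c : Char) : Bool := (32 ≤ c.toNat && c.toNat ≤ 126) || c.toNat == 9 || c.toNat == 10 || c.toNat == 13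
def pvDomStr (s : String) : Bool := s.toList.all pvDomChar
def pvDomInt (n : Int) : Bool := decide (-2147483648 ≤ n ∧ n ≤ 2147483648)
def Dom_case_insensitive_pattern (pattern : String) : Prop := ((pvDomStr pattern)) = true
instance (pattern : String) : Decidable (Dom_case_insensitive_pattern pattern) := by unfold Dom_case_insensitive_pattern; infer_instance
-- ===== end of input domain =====

-- B replaces A's four-state character machine by an index-free scan that handles
-- escape pairs and whole bracket groups as units (objective: alternative decomposition).

-- ===== PORT A =====
-- shared module helper char_to_case_insensitive (identical in both Pythons)
def ciChar (c : Char) : List Char :=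
  if PySem.Chars.isupper c || PySem.Chars.islower c then
    ['[', PySem.Chars.lowerChar c, PySem.Chars.upperChar c, ']']
  else [c]

-- one step of A's state machine: (state, new_pattern) updated by character c
def stepA (st : Nat × List Char) (c : Char) : Nat × List Char :=
  match st with
  | (0, acc) =>
      if c = '\\' then (1, acc ++ [c])
      else if c = '[' then (2, acc ++ [c])
      else (0, acc ++ ciChar c)
  | (1, acc) => (0, acc ++ [c])
  | (3, acc) => (2, acc ++ [c])
  | (2, acc) =>
      if c = ']' then (0, acc ++ [c])
      else if c = '\\' then (3, acc ++ [c])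
      else (2, acc ++ [c])
  | (s, acc) => (s, acc)  -- unreachable: Python raises for unknown states; states stay in {0,1,2,3}

def case_insensitive_pattern (pattern : String) : String :=
  String.ofList ((pattern.toList.foldl stepA (0, [])).2)

-- ===== PORT B =====
-- scan a bracket group's body: copy verbatim (escapes skipped) up to and
-- including the first unescaped ']'; none = no closing ']' (remainder copied raw)
def copyGroup : List Char → List Char × Option (List Char)
  | [] => ([], none)
  | ']' :: r => ([']'], some r)
  | '\\' :: [] => (['\\'], none)
  | '\\' :: d :: r => let p := copyGroup r; ('\\' :: d :: p.1, p.2)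
  | c :: r => let p := copyGroup r; (c :: p.1, p.2)

theorem copyGroup_some_lt : ∀ (l r' : List Char), (copyGroup l).2 = some r' → r'.length < l.length := by
  intro l
  fun_induction copyGroup l with
  | case1 => intro r' h; simp at h
  | case2 r => intro r' h; simp at h; simp [← h]
  | case3 => intro r' h; simp at h
  | case4 d r _p ih =>
      intro r' h; simp at h; have := ih r' h; simp; omega
  | case5 c r _ _ _ _p ih =>
      intro r' h; simp at h; have := ih r' h; simp; omega

def bAux : List Char → List Char
  | [] => []
  | '\\' :: [] => ['\\']
  | '\\' :: c :: r => '\\' :: c :: bAux r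
  | '[' :: r =>
      match h : copyGroup r with
      | (g, some r') => '[' :: (g ++ bAux r')
      | (g, none) => '[' :: g
  | c :: r => ciChar c ++ bAux r
termination_by l => l.length
decreasing_by
  all_goals simp
  all_goals (have := copyGroup_some_lt r r' (by rw [h]); omega)

def case_insensitive_pattern_alt (pattern : String) : String :=
  String.ofList (bAux pattern.toList)

-- ===== PRECONDITION & SPEC =====
def Spec_case_insensitive_pattern (pattern : String) (out : String) : Prop := out = case_insensitive_pattern_alt pattern
instance (pattern : String) (out : String) : Decidable (Spec_case_insensitive_pattern pattern out) := by unfold Spec_case_insensitive_pattern; infer_instance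

-- ===== CLAIM (what is proved, stated in full; the proofs are below) =====
def Claim_equal_case_insensitive_pattern : Prop := ∀ (pattern : String), Dom_case_insensitive_pattern pattern → Spec_case_insensitive_pattern pattern (case_insensitive_pattern pattern)

-- ===== LEMMAS AND PROOFS =====

-- inside a bracket group, A's states 2/3 copy verbatim exactly what copyGroup collects
theorem foldl_state2 : ∀ (l : List Char) (acc : List Char),
    (l.foldl stepA (2, acc)).2 =
      (match copyGroup l with
       | (g, some r') => (List.foldl stepA (0, acc ++ g) r').2
       | (g, none) => acc ++ g) := by
  intro l
  fun_induction copyGroup l with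
  | case1 => intro acc; simp
  | case2 r => intro acc; simp [stepA]
  | case3 => intro acc; simp [stepA]
  | case4 d r p ih =>
      intro acc
      have hstep : List.foldl stepA (2, acc) ('\\' :: d :: r)
           = List.foldl stepA (2, acc ++ ['\\'] ++ [d]) r := by
        simp [stepA]
      rw [hstep, ih]
      rcases hcg : copyGroup r with ⟨g, o⟩
      have hp : p = (g, o) := by rw [← hcg]
      cases o <;> simp_all [copyGroup, hp]
  | case5 c r hne hnb h3 p ih =>
      intro acc
      have hne' : ¬ c = ']' := fun hh => hne hh
      have hnb' : ¬ c = '\\' := by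
        intro hh
        cases r with
        | nil => exact hnb hh rfl
        | cons d t => exact h3 d t hh rfl
      have hstep : List.foldl stepA (2, acc) (c :: r) = List.foldl stepA (2, acc ++ [c]) r := by
        simp [stepA, hne', hnb']
      rw [hstep, ih]
      rcases hcg : copyGroup r with ⟨g, o⟩
      have hp : p = (g, o) := by rw [← hcg]
      cases o <;> simp_all [copyGroup, hp]

theorem foldl_state0 : ∀ (l acc : List Char), (l.foldl stepA (0, acc)).2 = acc ++ bAux l := by
  intro l
  fun_induction bAux l with
  | case1 => intro acc; simp
  | case2 => intro acc; simp [stepA]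
  | case3 c r ih =>
      intro acc
      have : List.foldl stepA (0, acc) ('\\' :: c :: r)
           = List.foldl stepA (0, acc ++ ['\\'] ++ [c]) r := by simp [stepA]
      rw [this, ih]; simp
  | case4 r g r' h ih =>
      intro acc
      have h1 : List.foldl stepA (0, acc) ('[' :: r) = List.foldl stepA (2, acc ++ ['[']) r := by
        simp [stepA]
      rw [h1, foldl_state2, h]
      simp [ih]
  | case5 r g h =>
      intro acc
      have h1 : List.foldl stepA (0, acc) ('[' :: r) = List.foldl stepA (2, acc ++ ['[']) r := by
        simp [stepA]
      rw [h1, foldl_state2, h]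
      simp [bAux]
  | case6 c r hb hbr hlb ih =>
      intro acc
      have hnb' : ¬ c = '\\' := by
        intro hh
        cases r with
        | nil => exact hb hh rfl
        | cons d t => exact hbr d t hh rfl
      have hlb' : ¬ c = '[' := fun hh => hlb hh
      have hstep : List.foldl stepA (0, acc) (c :: r) = List.foldl stepA (0, acc ++ ciChar c) r := by
        simp [stepA, hnb', hlb']
      rw [hstep, ih]
      simp [List.append_assoc]

-- ===== VERDICT (by name: the statement is the Claim_ definition above) =====
theorem case_insensitive_pattern_spec : Claim_equal_case_insensitive_pattern := by
  intro pattern _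
  unfold Spec_case_insensitive_pattern case_insensitive_pattern case_insensitive_pattern_alt
  rw [foldl_state0]
  simp
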